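-- pv_equiv track=rewrite | github.com/ScumbagJones/Webscraper-Site-Analyzer | component_translator.py | _build_tokens_section
-- ===== SOURCE A (Python) =====
-- def _build_tokens_section(blueprint: dict, translated: dict, computed: dict) -> str:
--     """Build design tokens section grouped by category."""
--     lines = []
--
--     # Colors
--     color_tokens = []
--     for prop in ['backgroundColor', 'color', 'borderColor']:
--         if prop in translated:
--             raw = computed.get(prop, '')
--             color_tokens.append(f'`{translated[prop]}` ({raw})')
--     if color_tokens:
--         lines.append(f'- **Color:** {", ".join(color_tokens)}')
--
--     # Typography
--     typo_tokens = []
--     for prop in ['fontSize', 'fontWeight', 'lineHeight', 'letterSpacing']: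
--         if prop in translated:
--             typo_tokens.append(f'`{translated[prop]}`')
--     if typo_tokens:
--         lines.append(f'- **Typography:** {" / ".join(typo_tokens)}')
--
--     # Spacing
--     spacing_tokens = []
--     for prop in ['padding', 'paddingTop', 'paddingRight', 'paddingBottom', 'paddingLeft',
--                  'margin', 'marginTop', 'gap']:
--         if prop in translated:
--             raw = computed.get(prop, '')
--             spacing_tokens.append(f'`{translated[prop]}` ({raw})')
--     if spacing_tokens:
--         lines.append(f'- **Spacing:** {", ".join(spacing_tokens[:4])}')
--
--     # Border
--     if 'borderRadius' in translated:
--         raw = computed.get('borderRadius', '')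
--         lines.append(f'- **Border:** `{translated["borderRadius"]}` ({raw})')
--
--     # Shadow
--     if 'boxShadow' in translated:
--         lines.append(f'- **Shadow:** `{translated["boxShadow"]}`')
--
--     # Motion (from transition property)
--     transition = computed.get('transition', '')
--     if transition and transition not in ('none', 'all 0s ease 0s'):
--         lines.append(f'- **Motion:** `{transition[:60]}`')
--
--     return '\n'.join(lines) if lines else '_(no design tokens mapped)_'
-- ===== SOURCE B (Python) =====
-- # Inverted traversal: one pass over translated.items() classifying each property
-- # through a precomputed property index into per-category rank buckets, then each
-- # bucket is rank-sorted and rendered.  A instead scans fixed property lists per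
-- # category and probes the dict for each.
--
-- _PROP_INDEX = {
--     'backgroundColor': (0, 0, True), 'color': (0, 1, True), 'borderColor': (0, 2, True),
--     'fontSize': (1, 0, False), 'fontWeight': (1, 1, False),
--     'lineHeight': (1, 2, False), 'letterSpacing': (1, 3, False),
--     'padding': (2, 0, True), 'paddingTop': (2, 1, True), 'paddingRight': (2, 2, True),
--     'paddingBottom': (2, 3, True), 'paddingLeft': (2, 4, True),
--     'margin': (2, 5, True), 'marginTop': (2, 6, True), 'gap': (2, 7, True),
--     'borderRadius': (3, 0, True), 'boxShadow': (4, 0, False),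
-- }
--
-- _CATS = [('Color', ', ', None), ('Typography', ' / ', None),
--          ('Spacing', ', ', 4), ('Border', ', ', None), ('Shadow', ', ', None)]
--
--
-- def _build_tokens_section(blueprint: dict, translated: dict, computed: dict) -> str:
--     """Build design tokens section grouped by category (single pass + rank buckets)."""
--     buckets = {}
--     for prop, value in translated.items():
--         info = _PROP_INDEX.get(prop)
--         if info is not None:
--             cat, rank, with_raw = info
--             token = f'`{value}` ({computed.get(prop, "")})' if with_raw else f'`{value}`'
--             buckets.setdefault(cat, []).append((rank, token))
--
--     lines = []
--     for cat, (label, sep, limit) in enumerate(_CATS):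
--         bucket = sorted(buckets.get(cat, []), key=lambda t: t[0])
--         if bucket:
--             lines.append(f'- **{label}:** ' + sep.join(tok for _, tok in bucket[:limit]))
--
--     transition = computed.get('transition', '')
--     if transition and transition not in ('none', 'all 0s ease 0s'):
--         lines.append(f'- **Motion:** `{transition[:60]}`')
--
--     return '\n'.join(lines) if lines else '_(no design tokens mapped)_'
-- ===== Notes on version B (the rewrite author's own statement) =====
-- stated objective: alternative
-- what changed: Inverts the traversal: instead of scanning fixed per-category property lists and probing the dict for each, B makes a single pass over translated.items(), classifies each property through a precomputed property->(category,rank,raw) index into per-category buckets, then sorts each bucket by rank and renders the lines.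
import Mathlib
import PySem

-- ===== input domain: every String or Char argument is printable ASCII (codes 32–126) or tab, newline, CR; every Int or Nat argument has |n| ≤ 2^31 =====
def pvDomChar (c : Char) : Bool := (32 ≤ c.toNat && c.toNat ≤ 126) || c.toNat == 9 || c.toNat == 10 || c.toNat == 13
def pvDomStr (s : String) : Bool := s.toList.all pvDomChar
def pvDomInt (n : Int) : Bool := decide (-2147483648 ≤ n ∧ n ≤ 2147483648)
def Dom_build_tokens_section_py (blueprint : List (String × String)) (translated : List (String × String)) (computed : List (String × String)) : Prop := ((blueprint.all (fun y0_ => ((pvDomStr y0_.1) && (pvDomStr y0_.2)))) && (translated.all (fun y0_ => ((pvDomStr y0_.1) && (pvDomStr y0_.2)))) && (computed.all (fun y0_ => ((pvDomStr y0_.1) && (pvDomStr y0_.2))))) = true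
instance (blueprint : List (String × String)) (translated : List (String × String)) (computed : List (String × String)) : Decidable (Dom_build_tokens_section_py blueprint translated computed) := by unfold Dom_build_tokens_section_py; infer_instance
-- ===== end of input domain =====

-- B inverts the traversal: one pass over translated's items classified through a
-- property->(category,rank,raw) index into per-category buckets, each rank-sorted and
-- rendered; A instead scans fixed per-category property lists probing the dict.


-- ===== PORT A =====
-- literal transliteration of A: each category block in sequence; 'p in translated' is
-- Dict.contains, 'translated[p]' under that guard is Dict.getD, 'computed.get(p, "")' is
-- Dict.getD; 'spacing_tokens[:4]' with a nonnegative literal bound is List.take 4 (exact);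
-- 'transition[:60]' is PySem.Str.slice.
def build_tokens_section_py (blueprint : List (String × String)) (translated : List (String × String)) (computed : List (String × String)) : String :=
  let _ := blueprint
  let tr := PySem.Dict.ofList translated
  let cp := PySem.Dict.ofList computed
  let lines : List String := []
  -- Colors
  let color_tokens := ["backgroundColor", "color", "borderColor"].foldl (fun acc p =>
      if tr.contains p then acc ++ ["`" ++ tr.getD p "" ++ "` (" ++ cp.getD p "" ++ ")"] else acc) []
  let lines := if color_tokens ≠ [] then lines ++ ["- **Color:** " ++ PySem.Str.join ", " color_tokens] else lines
  -- Typography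
  let typo_tokens := ["fontSize", "fontWeight", "lineHeight", "letterSpacing"].foldl (fun acc p =>
      if tr.contains p then acc ++ ["`" ++ tr.getD p "" ++ "`"] else acc) []
  let lines := if typo_tokens ≠ [] then lines ++ ["- **Typography:** " ++ PySem.Str.join " / " typo_tokens] else lines
  -- Spacing
  let spacing_tokens := ["padding", "paddingTop", "paddingRight", "paddingBottom", "paddingLeft",
      "margin", "marginTop", "gap"].foldl (fun acc p =>
      if tr.contains p then acc ++ ["`" ++ tr.getD p "" ++ "` (" ++ cp.getD p "" ++ ")"] else acc) []
  let lines := if spacing_tokens ≠ [] then lines ++ ["- **Spacing:** " ++ PySem.Str.join ", " (spacing_tokens.take 4)] else lines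
  -- Border
  let lines := if tr.contains "borderRadius" then
      lines ++ ["- **Border:** `" ++ tr.getD "borderRadius" "" ++ "` (" ++ cp.getD "borderRadius" "" ++ ")"] else lines
  -- Shadow
  let lines := if tr.contains "boxShadow" then
      lines ++ ["- **Shadow:** `" ++ tr.getD "boxShadow" "" ++ "`"] else lines
  -- Motion
  let transition := cp.getD "transition" ""
  let lines := if transition ≠ "" ∧ ¬(transition = "none" ∨ transition = "all 0s ease 0s") then
      lines ++ ["- **Motion:** `" ++ PySem.Str.slice transition none (some 60) ++ "`"] else lines
  if lines ≠ [] then PySem.Str.join "\n" lines else "_(no design tokens mapped)_"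

-- ===== PORT B =====
-- literal transliteration of B (Source B): the module-level property index _PROP_INDEX,
-- one foldl over translated.items() appending (rank, token) to buckets.setdefault(cat,[])
-- (= Dict.modify cat [] (· ++ [...])), then a foldl over enumerate(_CATS) sorting each
-- bucket by rank (sorted(..., key=fst) = PySem.List.sorted _ (·.1)); 'bucket[:limit]' is
-- the identity for limit None and List.take k for a literal k ≥ 0.
-- the dict literal _PROP_INDEX (its 17 keys are distinct, so its items are exactly this list)
def pvPropIndex : PySem.Dict String (Int × Int × Bool) := PySem.Dict.mk
  [("backgroundColor", (0, 0, true)), ("color", (0, 1, true)), ("borderColor", (0, 2, true)),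
   ("fontSize", (1, 0, false)), ("fontWeight", (1, 1, false)),
   ("lineHeight", (1, 2, false)), ("letterSpacing", (1, 3, false)),
   ("padding", (2, 0, true)), ("paddingTop", (2, 1, true)), ("paddingRight", (2, 2, true)),
   ("paddingBottom", (2, 3, true)), ("paddingLeft", (2, 4, true)),
   ("margin", (2, 5, true)), ("marginTop", (2, 6, true)), ("gap", (2, 7, true)),
   ("borderRadius", (3, 0, true)), ("boxShadow", (4, 0, false))]

def pvCats : List (String × String × Option Nat) :=
  [("Color", ", ", none), ("Typography", " / ", none), ("Spacing", ", ", some 4),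
   ("Border", ", ", none), ("Shadow", ", ", none)]

def build_tokens_section_py_alt (blueprint : List (String × String)) (translated : List (String × String)) (computed : List (String × String)) : String :=
  let _ := blueprint
  let tr := PySem.Dict.ofList translated
  let cp := PySem.Dict.ofList computed
  let buckets : PySem.Dict Int (List (Int × String)) := tr.items.foldl (fun d pv =>
      match pvPropIndex.get? pv.1 with
      | some info =>
          d.modify info.1 [] (· ++ [(info.2.1,
            if info.2.2 then "`" ++ pv.2 ++ "` (" ++ cp.getD pv.1 "" ++ ")" else "`" ++ pv.2 ++ "`")])
      | none => d) PySem.Dict.empty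
  let lines := (PySem.List.enumerate pvCats).foldl (fun lines ec =>
      let bucket := PySem.List.sorted (buckets.getD ec.1 []) (fun t => t.1)
      if bucket ≠ [] then
        lines ++ ["- **" ++ ec.2.1 ++ ":** " ++ PySem.Str.join ec.2.2.1
          ((match ec.2.2.2 with | none => bucket | some k => bucket.take k).map (fun t : Int × String => t.2))]
      else lines) []
  let transition := cp.getD "transition" ""
  let lines := if transition ≠ "" ∧ ¬(transition = "none" ∨ transition = "all 0s ease 0s") then
      lines ++ ["- **Motion:** `" ++ PySem.Str.slice transition none (some 60) ++ "`"] else lines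
  if lines ≠ [] then PySem.Str.join "\n" lines else "_(no design tokens mapped)_"

-- ===== PRECONDITION & SPEC =====
def Spec_build_tokens_section_py (blueprint : List (String × String)) (translated : List (String × String)) (computed : List (String × String)) (out : String) : Prop := out = build_tokens_section_py_alt blueprint translated computed
instance (blueprint : List (String × String)) (translated : List (String × String)) (computed : List (String × String)) (out : String) : Decidable (Spec_build_tokens_section_py blueprint translated computed out) := by unfold Spec_build_tokens_section_py; infer_instance

-- ===== CLAIM (what is proved, stated in full; the proofs are below) =====
def Claim_equal_build_tokens_section_py : Prop := ∀ (blueprint : List (String × String)) (translated : List (String × String)) (computed : List (String × String)), Dom_build_tokens_section_py blueprint translated computed → Spec_build_tokens_section_py blueprint translated computed (build_tokens_section_py blueprint translated computed)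

-- ===== LEMMAS AND PROOFS =====

-- B's classifier as a single Option-valued function per category index.
def pvF (cp : PySem.Dict String String) (ci : Int) (p v : String) : Option (Int × String) :=
  (pvPropIndex.get? p).bind (fun info =>
    if info.1 == ci then
      some (info.2.1, if info.2.2 then "`" ++ v ++ "` (" ++ cp.getD p "" ++ ")" else "`" ++ v ++ "`")
    else none)

-- the target value of a rank-sorted bucket: tokens in property-list order.
def pvYs (tr cp : PySem.Dict String String) (ci : Int) (pr : List String) : List (Int × String) :=
  pr.filterMap (fun p => (tr.get? p).bind (pvF cp ci p))

-- B's bucket-filling loop, re-expressed: skip-or-modify foldl = foldl over the classified list.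
theorem buckets_foldl_eq (its : List (String × String)) (cp : PySem.Dict String String) :
    (its.foldl (fun d pv =>
      match pvPropIndex.get? pv.1 with
      | some info =>
          d.modify info.1 [] (· ++ [(info.2.1,
            if info.2.2 then "`" ++ pv.2 ++ "` (" ++ cp.getD pv.1 "" ++ ")" else "`" ++ pv.2 ++ "`")])
      | none => d) PySem.Dict.empty)
    = ((its.filterMap (fun pv => (pvPropIndex.get? pv.1).map (fun info =>
        (info.1, (info.2.1,
          if info.2.2 then "`" ++ pv.2 ++ "` (" ++ cp.getD pv.1 "" ++ ")" else "`" ++ pv.2 ++ "`"))))).foldl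
        (fun d q => d.modify q.1 [] (· ++ [q.2])) PySem.Dict.empty) := by
  rw [List.foldl_filterMap]
  congr 1
  funext d pv
  cases h : pvPropIndex.get? pv.1 with
  | none => simp
  | some info => obtain ⟨a, b, c⟩ := info; simp

-- the finished bucket for category ci is a filterMap of the items by pvF.
theorem bucket_eq (its : List (String × String)) (cp : PySem.Dict String String) (ci : Int) :
    ((its.foldl (fun d pv =>
      match pvPropIndex.get? pv.1 with
      | some info =>
          d.modify info.1 [] (· ++ [(info.2.1,
            if info.2.2 then "`" ++ pv.2 ++ "` (" ++ cp.getD pv.1 "" ++ ")" else "`" ++ pv.2 ++ "`")])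
      | none => d) PySem.Dict.empty).getD ci [])
    = its.filterMap (fun pv => pvF cp ci pv.1 pv.2) := by
  rw [buckets_foldl_eq, PySem.Dict.getD_foldl_modify_append, PySem.Dict.getD_empty,
    List.filter_filterMap, List.map_filterMap, List.nil_append]
  apply List.filterMap_congr
  intro pv _
  cases h : pvPropIndex.get? pv.1 with
  | none => simp [pvF, h]
  | some info =>
    obtain ⟨a, b, c⟩ := info
    by_cases hc : (a == ci) = true
    · simp [pvF, h, hc, Option.filter]; exact eq_of_beq hc
    · simp [pvF, h, hc, Option.filter]; exact fun he => hc (by simp [he])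

-- core permutation: a key-classified scan of a nodup-keyed item list is a permutation of
-- the schema-ordered lookup scan.
theorem perm_filterMap_get? {γ : Type} (pr : List String) (f : String → String → Option γ)
    (its : List (String × String)) (hnd : (its.map (·.1)).Nodup) (hpr : pr.Nodup)
    (hsupp : ∀ p v x, f p v = some x → p ∈ pr) :
    (its.filterMap (fun pv => f pv.1 pv.2)).Perm
      (pr.filterMap (fun p => ((PySem.Dict.mk its).get? p).bind (f p))) := by
  induction pr generalizing f with
  | nil =>
    have hz : its.filterMap (fun pv => f pv.1 pv.2) = [] := by
      rw [List.filterMap_eq_nil_iff]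
      intro pv _
      cases hx : f pv.1 pv.2 with
      | none => rfl
      | some x => exact absurd (hsupp _ _ _ hx) (List.not_mem_nil)
    simp [hz]
  | cons p rest ih =>
    have hpnr : p ∉ rest := (List.nodup_cons.mp hpr).1
    have hprr : rest.Nodup := (List.nodup_cons.mp hpr).2
    -- the classifier with key p switched off
    have hsupp' : ∀ q w x, (fun q w => if q = p then none else f q w) q w = some x → q ∈ rest := by
      intro q w x hx
      simp only at hx
      by_cases hqp : q = p
      · rw [if_pos hqp] at hx; exact absurd hx (by simp)
      · rw [if_neg hqp] at hx
        exact (List.mem_cons.mp (hsupp q w x hx)).resolve_left hqp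
    have hrest : rest.filterMap
          (fun q => ((PySem.Dict.mk its).get? q).bind ((fun q w => if q = p then none else f q w) q))
        = rest.filterMap (fun q => ((PySem.Dict.mk its).get? q).bind (f q)) := by
      apply List.filterMap_congr
      intro q hq
      have hqp : q ≠ p := fun he => hpnr (he ▸ hq)
      cases (PySem.Dict.mk its).get? q <;> simp [hqp]
    have ih' := hrest ▸ ih (fun q w => if q = p then none else f q w) hprr hsupp'
    rw [List.filterMap_cons]
    cases hg : (PySem.Dict.mk its).get? p with
    | none =>
      have hpk : ∀ pv ∈ its, pv.1 ≠ p := by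
        intro pv hm he
        exact ((PySem.Dict.get?_eq_none_iff_not_mem_keys (PySem.Dict.mk its) p).mp hg)
          (by rw [PySem.Dict.keys, ← he]; exact List.mem_map_of_mem (f := (·.1)) hm)
      have h1 : its.filterMap (fun pv => f pv.1 pv.2)
          = its.filterMap (fun pv => if pv.1 = p then none else f pv.1 pv.2) :=
        List.filterMap_congr (fun pv hm => by simp [hpk pv hm])
      rw [h1]
      simpa using ih'
    | some v =>
      have hnd' : (PySem.Dict.mk its).keys.Nodup := by
        simpa [PySem.Dict.keys] using hnd
      have hmem : (p, v) ∈ its :=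
        (PySem.Dict.get?_eq_some_iff_mem_items (PySem.Dict.mk its) p v hnd').mp hg
      obtain ⟨l1, l2, heq⟩ := List.append_of_mem hmem
      subst heq
      have hnd2 := hnd
      rw [List.map_append] at hnd2
      have hdisj := List.disjoint_of_nodup_append hnd2
      have hk1 : ∀ pv ∈ l1, pv.1 ≠ p := by
        intro pv hm he
        exact hdisj (List.mem_map_of_mem (f := (·.1)) hm) (by simp [he])
      have hk2 : ∀ pv ∈ l2, pv.1 ≠ p := by
        intro pv hm he
        have := (List.Nodup.of_append_right hnd2)
        rw [List.map_cons, List.nodup_cons] at this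
        exact this.1 (by rw [← he]; exact List.mem_map_of_mem (f := (·.1)) hm)
      have c1 : l1.filterMap (fun pv => f pv.1 pv.2)
          = l1.filterMap (fun pv => if pv.1 = p then none else f pv.1 pv.2) :=
        List.filterMap_congr (fun pv hm => by simp [hk1 pv hm])
      have c2 : l2.filterMap (fun pv => f pv.1 pv.2)
          = l2.filterMap (fun pv => if pv.1 = p then none else f pv.1 pv.2) :=
        List.filterMap_congr (fun pv hm => by simp [hk2 pv hm])
      have hfm' : l1.filterMap (fun pv => f pv.1 pv.2) ++ l2.filterMap (fun pv => f pv.1 pv.2)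
          = (l1 ++ (p, v) :: l2).filterMap (fun pv => if pv.1 = p then none else f pv.1 pv.2) := by
        rw [c1, c2]
        simp [List.filterMap_append]
      have hb : ((some v).bind (f p)) = f p v := rfl
      rw [List.filterMap_append, List.filterMap_cons, hb]
      cases hf : f p v with
      | none =>
        rw [hfm']
        simpa [hf] using ih'
      | some x =>
        refine List.Perm.trans List.perm_middle (List.Perm.cons x ?_)
        rw [hfm']
        simpa [hf] using ih'

-- rank-sorting B's bucket recovers the property-list order.
theorem sorted_bucket (tr cp : PySem.Dict String String) (ci : Int) (pr : List String)
    (hnd : tr.keys.Nodup) (hpr : pr.Nodup)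
    (hsupp : ∀ p v x, pvF cp ci p v = some x → p ∈ pr)
    (hpw : (pvYs tr cp ci pr).Pairwise (fun a b => a.1 < b.1)) :
    PySem.List.sorted (tr.items.filterMap (fun pv => pvF cp ci pv.1 pv.2)) (fun t => t.1)
      = pvYs tr cp ci pr := by
  apply PySem.List.sorted_eq_of_perm_of_pairwise_lt _ _ _ ?_ hpw
  have h := perm_filterMap_get? pr (pvF cp ci) tr.items
    (by simpa [PySem.Dict.keys] using hnd) hpr hsupp
  have heta : PySem.Dict.mk tr.items = tr := rfl
  rw [heta] at h
  simpa [pvYs] using h.symm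

theorem pvPI_nodup : pvPropIndex.keys.Nodup := by decide

-- the rank a successful classification carries is the one recorded in the index.
theorem fst_of_pvF {cp : PySem.Dict String String} {ci : Int} {p v : String} {x : Int × String}
    (h : pvF cp ci p v = some x) :
    x.1 = ((pvPropIndex.get? p).map (fun i => i.2.1)).getD 0 := by
  rw [pvF] at h
  obtain ⟨info, hg, hx⟩ := Option.bind_eq_some_iff.mp h
  rw [hg]
  cases hc : (info.1 == ci)
  · rw [if_neg (by simp [hc])] at hx; exact absurd hx (by simp)
  · rw [if_pos (by simp [hc])] at hx
    cases Option.some.inj hx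
    rfl

-- extracting the tokens from a bucket target, category by category.
theorem snd_pvYs (tr cp : PySem.Dict String String) (ci : Int) (pr : List String)
    (tokf : String → String → String)
    (h : ∀ p ∈ pr, ∀ v, (pvF cp ci p v).map (fun t : Int × String => t.2) = some (tokf p v)) :
    (pvYs tr cp ci pr).map (fun t : Int × String => t.2)
      = pr.filterMap (fun p => (tr.get? p).map (fun v => tokf p v)) := by
  rw [pvYs, List.map_filterMap]
  apply List.filterMap_congr
  intro p hp
  cases hg : tr.get? p
  · simp
  · simp [← h p hp]

theorem sup_color (cp : PySem.Dict String String) :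
    ∀ p v x, pvF cp 0 p v = some x → p ∈ (["backgroundColor", "color", "borderColor"] : List String) := by
  intro p v x h
  rw [pvF] at h
  obtain ⟨info, hg, hx⟩ := Option.bind_eq_some_iff.mp h
  cases hci : (info.1 == (0 : Int)) with
  | false => rw [if_neg (by simp [hci])] at hx; exact absurd hx (by simp)
  | true =>
    have hmem := (PySem.Dict.get?_eq_some_iff_mem_items pvPropIndex p info pvPI_nodup).mp hg
    simp only [pvPropIndex, List.mem_cons, Prod.mk.injEq, List.not_mem_nil, or_false] at hmem
    rcases hmem with ⟨rfl,rfl⟩|⟨rfl,rfl⟩|⟨rfl,rfl⟩|⟨rfl,rfl⟩|⟨rfl,rfl⟩|⟨rfl,rfl⟩|⟨rfl,rfl⟩|⟨rfl,rfl⟩|⟨rfl,rfl⟩|⟨rfl,rfl⟩|⟨rfl,rfl⟩|⟨rfl,rfl⟩|⟨rfl,rfl⟩|⟨rfl,rfl⟩|⟨rfl,rfl⟩|⟨rfl,rfl⟩|⟨rfl,rfl⟩ <;> simp_all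

theorem sup_typo (cp : PySem.Dict String String) :
    ∀ p v x, pvF cp 1 p v = some x → p ∈ (["fontSize", "fontWeight", "lineHeight", "letterSpacing"] : List String) := by
  intro p v x h
  rw [pvF] at h
  obtain ⟨info, hg, hx⟩ := Option.bind_eq_some_iff.mp h
  cases hci : (info.1 == (1 : Int)) with
  | false => rw [if_neg (by simp [hci])] at hx; exact absurd hx (by simp)
  | true =>
    have hmem := (PySem.Dict.get?_eq_some_iff_mem_items pvPropIndex p info pvPI_nodup).mp hg
    simp only [pvPropIndex, List.mem_cons, Prod.mk.injEq, List.not_mem_nil, or_false] at hmem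
    rcases hmem with ⟨rfl,rfl⟩|⟨rfl,rfl⟩|⟨rfl,rfl⟩|⟨rfl,rfl⟩|⟨rfl,rfl⟩|⟨rfl,rfl⟩|⟨rfl,rfl⟩|⟨rfl,rfl⟩|⟨rfl,rfl⟩|⟨rfl,rfl⟩|⟨rfl,rfl⟩|⟨rfl,rfl⟩|⟨rfl,rfl⟩|⟨rfl,rfl⟩|⟨rfl,rfl⟩|⟨rfl,rfl⟩|⟨rfl,rfl⟩ <;> simp_all

theorem sup_spacing (cp : PySem.Dict String String) :
    ∀ p v x, pvF cp 2 p v = some x → p ∈ (["padding", "paddingTop", "paddingRight", "paddingBottom", "paddingLeft", "margin", "marginTop", "gap"] : List String) := by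
  intro p v x h
  rw [pvF] at h
  obtain ⟨info, hg, hx⟩ := Option.bind_eq_some_iff.mp h
  cases hci : (info.1 == (2 : Int)) with
  | false => rw [if_neg (by simp [hci])] at hx; exact absurd hx (by simp)
  | true =>
    have hmem := (PySem.Dict.get?_eq_some_iff_mem_items pvPropIndex p info pvPI_nodup).mp hg
    simp only [pvPropIndex, List.mem_cons, Prod.mk.injEq, List.not_mem_nil, or_false] at hmem
    rcases hmem with ⟨rfl,rfl⟩|⟨rfl,rfl⟩|⟨rfl,rfl⟩|⟨rfl,rfl⟩|⟨rfl,rfl⟩|⟨rfl,rfl⟩|⟨rfl,rfl⟩|⟨rfl,rfl⟩|⟨rfl,rfl⟩|⟨rfl,rfl⟩|⟨rfl,rfl⟩|⟨rfl,rfl⟩|⟨rfl,rfl⟩|⟨rfl,rfl⟩|⟨rfl,rfl⟩|⟨rfl,rfl⟩|⟨rfl,rfl⟩ <;> simp_all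

theorem sup_border (cp : PySem.Dict String String) :
    ∀ p v x, pvF cp 3 p v = some x → p ∈ (["borderRadius"] : List String) := by
  intro p v x h
  rw [pvF] at h
  obtain ⟨info, hg, hx⟩ := Option.bind_eq_some_iff.mp h
  cases hci : (info.1 == (3 : Int)) with
  | false => rw [if_neg (by simp [hci])] at hx; exact absurd hx (by simp)
  | true =>
    have hmem := (PySem.Dict.get?_eq_some_iff_mem_items pvPropIndex p info pvPI_nodup).mp hg
    simp only [pvPropIndex, List.mem_cons, Prod.mk.injEq, List.not_mem_nil, or_false] at hmem
    rcases hmem with ⟨rfl,rfl⟩|⟨rfl,rfl⟩|⟨rfl,rfl⟩|⟨rfl,rfl⟩|⟨rfl,rfl⟩|⟨rfl,rfl⟩|⟨rfl,rfl⟩|⟨rfl,rfl⟩|⟨rfl,rfl⟩|⟨rfl,rfl⟩|⟨rfl,rfl⟩|⟨rfl,rfl⟩|⟨rfl,rfl⟩|⟨rfl,rfl⟩|⟨rfl,rfl⟩|⟨rfl,rfl⟩|⟨rfl,rfl⟩ <;> simp_all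

theorem sup_shadow (cp : PySem.Dict String String) :
    ∀ p v x, pvF cp 4 p v = some x → p ∈ (["boxShadow"] : List String) := by
  intro p v x h
  rw [pvF] at h
  obtain ⟨info, hg, hx⟩ := Option.bind_eq_some_iff.mp h
  cases hci : (info.1 == (4 : Int)) with
  | false => rw [if_neg (by simp [hci])] at hx; exact absurd hx (by simp)
  | true =>
    have hmem := (PySem.Dict.get?_eq_some_iff_mem_items pvPropIndex p info pvPI_nodup).mp hg
    simp only [pvPropIndex, List.mem_cons, Prod.mk.injEq, List.not_mem_nil, or_false] at hmem
    rcases hmem with ⟨rfl,rfl⟩|⟨rfl,rfl⟩|⟨rfl,rfl⟩|⟨rfl,rfl⟩|⟨rfl,rfl⟩|⟨rfl,rfl⟩|⟨rfl,rfl⟩|⟨rfl,rfl⟩|⟨rfl,rfl⟩|⟨rfl,rfl⟩|⟨rfl,rfl⟩|⟨rfl,rfl⟩|⟨rfl,rfl⟩|⟨rfl,rfl⟩|⟨rfl,rfl⟩|⟨rfl,rfl⟩|⟨rfl,rfl⟩ <;> simp_all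

theorem pw_color (tr cp : PySem.Dict String String) :
    (pvYs tr cp 0 ["backgroundColor", "color", "borderColor"]).Pairwise (fun a b => a.1 < b.1) := by
  rw [pvYs, List.pairwise_filterMap]
  simp only [List.pairwise_cons, List.mem_cons, List.not_mem_nil,
    forall_eq_or_imp, forall_eq, List.Pairwise.nil, or_false]
  and_intros <;>
    first
    | trivial
    | (intro b hb b' hb'
       first
       | exact hb.elim
       | (obtain ⟨v, -, hv⟩ := Option.bind_eq_some_iff.mp hb
          obtain ⟨v', -, hv'⟩ := Option.bind_eq_some_iff.mp hb'
          rw [fst_of_pvF hv, fst_of_pvF hv']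
          decide))

theorem pw_typo (tr cp : PySem.Dict String String) :
    (pvYs tr cp 1 ["fontSize", "fontWeight", "lineHeight", "letterSpacing"]).Pairwise (fun a b => a.1 < b.1) := by
  rw [pvYs, List.pairwise_filterMap]
  simp only [List.pairwise_cons, List.mem_cons, List.not_mem_nil,
    forall_eq_or_imp, forall_eq, List.Pairwise.nil, or_false]
  and_intros <;>
    first
    | trivial
    | (intro b hb b' hb'
       first
       | exact hb.elim
       | (obtain ⟨v, -, hv⟩ := Option.bind_eq_some_iff.mp hb
          obtain ⟨v', -, hv'⟩ := Option.bind_eq_some_iff.mp hb'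
          rw [fst_of_pvF hv, fst_of_pvF hv']
          decide))

theorem pw_spacing (tr cp : PySem.Dict String String) :
    (pvYs tr cp 2 ["padding", "paddingTop", "paddingRight", "paddingBottom", "paddingLeft", "margin", "marginTop", "gap"]).Pairwise (fun a b => a.1 < b.1) := by
  rw [pvYs, List.pairwise_filterMap]
  simp only [List.pairwise_cons, List.mem_cons, List.not_mem_nil,
    forall_eq_or_imp, forall_eq, List.Pairwise.nil, or_false]
  and_intros <;>
    first
    | trivial
    | (intro b hb b' hb'
       first
       | exact hb.elim
       | (obtain ⟨v, -, hv⟩ := Option.bind_eq_some_iff.mp hb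
          obtain ⟨v', -, hv'⟩ := Option.bind_eq_some_iff.mp hb'
          rw [fst_of_pvF hv, fst_of_pvF hv']
          decide))

theorem pw_border (tr cp : PySem.Dict String String) :
    (pvYs tr cp 3 ["borderRadius"]).Pairwise (fun a b => a.1 < b.1) := by
  rw [pvYs, List.pairwise_filterMap]
  simp

theorem pw_shadow (tr cp : PySem.Dict String String) :
    (pvYs tr cp 4 ["boxShadow"]).Pairwise (fun a b => a.1 < b.1) := by
  rw [pvYs, List.pairwise_filterMap]
  simp

-- A's append-if loop over a property list equals a filter-then-map comprehension.
theorem tokens_loop_eq (tr : PySem.Dict String String) (f : String → String) (props : List String) :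
    props.foldl (fun acc p => if tr.contains p then acc ++ [f p] else acc) [] =
      (props.filter (fun p => tr.contains p)).map f := by
  simpa using PySem.List.foldl_append_if (fun p => tr.contains p) f props ([])

-- …and that comprehension is the lookup-scan over the same list.
theorem filter_contains_map (tr : PySem.Dict String String) (P : List String) (h : String → String → String) :
    (P.filter (fun p => tr.contains p)).map (fun p => h p (tr.getD p "")) =
      P.filterMap (fun p => (tr.get? p).map (fun v => h p v)) := by
  induction P with
  | nil => rfl
  | cons p rest ih =>
    by_cases hc : tr.contains p = true
    · obtain ⟨v, hv⟩ := Option.isSome_iff_exists.mp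
        (show (tr.get? p).isSome = true by rw [← PySem.Dict.contains_eq_isSome_get? tr p]; exact hc)
      have hg : tr.getD p "" = v := PySem.Dict.getD_of_get?_eq_some tr "" hv
      simp [hc, hv, hg, ih]
    · have hn : tr.get? p = none := by
        rw [PySem.Dict.contains_eq_isSome_get?] at hc
        exact Option.not_isSome_iff_eq_none.mp (by simpa using hc)
      simp [hc, hn, ih]

-- join with a singleton list is the element itself.
theorem join_singleton (sep x : String) : PySem.Str.join sep [x] = x := by
  simp [PySem.Str.join]

-- merging a string literal with a following backtick literal.
theorem border_lit (x : String) : "- **Border:** " ++ ("`" ++ x) = "- **Border:** `" ++ x := by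
  rw [← String.append_assoc]; rfl

theorem shadow_lit (x : String) : "- **Shadow:** " ++ ("`" ++ x) = "- **Shadow:** `" ++ x := by
  rw [← String.append_assoc]; rfl

theorem pvF_border (cp : PySem.Dict String String) (v : String) :
    pvF cp 3 "borderRadius" v = some (0, "`" ++ v ++ "` (" ++ cp.getD "borderRadius" "" ++ ")") := rfl

theorem pvF_shadow (cp : PySem.Dict String String) (v : String) :
    pvF cp 4 "boxShadow" v = some (0, "`" ++ v ++ "`") := rfl

theorem pvYs_border_none (tr cp : PySem.Dict String String)
    (h : tr.get? "borderRadius" = none) : pvYs tr cp 3 ["borderRadius"] = [] := by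
  simp [pvYs, h]

theorem pvYs_border_some (tr cp : PySem.Dict String String) (v : String)
    (h : tr.get? "borderRadius" = some v) :
    pvYs tr cp 3 ["borderRadius"] = [(0, "`" ++ v ++ "` (" ++ cp.getD "borderRadius" "" ++ ")")] := by
  simp [pvYs, h, pvF_border]

theorem pvYs_shadow_none (tr cp : PySem.Dict String String)
    (h : tr.get? "boxShadow" = none) : pvYs tr cp 4 ["boxShadow"] = [] := by
  simp [pvYs, h]

theorem pvYs_shadow_some (tr cp : PySem.Dict String String) (v : String)
    (h : tr.get? "boxShadow" = some v) :
    pvYs tr cp 4 ["boxShadow"] = [(0, "`" ++ v ++ "`")] := by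
  simp [pvYs, h, pvF_shadow]

-- ===== VERDICT (by name: the statement is the Claim_ definition above) =====
set_option maxHeartbeats 1000000 in
theorem build_tokens_section_py_spec : Claim_equal_build_tokens_section_py := by
  intro blueprint translated computed _
  unfold Spec_build_tokens_section_py build_tokens_section_py build_tokens_section_py_alt
  simp only [tokens_loop_eq]
  rw [filter_contains_map (PySem.Dict.ofList translated)
        ["backgroundColor", "color", "borderColor"]
        (fun p v => "`" ++ v ++ "` (" ++ (PySem.Dict.ofList computed).getD p "" ++ ")"),
      filter_contains_map (PySem.Dict.ofList translated)
        ["fontSize", "fontWeight", "lineHeight", "letterSpacing"]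
        (fun p v => "`" ++ v ++ "`"),
      filter_contains_map (PySem.Dict.ofList translated)
        ["padding", "paddingTop", "paddingRight", "paddingBottom", "paddingLeft",
         "margin", "marginTop", "gap"]
        (fun p v => "`" ++ v ++ "` (" ++ (PySem.Dict.ofList computed).getD p "" ++ ")")]
  simp only [pvCats, PySem.List.enumerate_cons, PySem.List.enumerate_nil,
    List.foldl_cons, List.foldl_nil, Int.reduceAdd, bucket_eq]
  have hnd : (PySem.Dict.ofList translated).keys.Nodup := PySem.Dict.nodup_keys_ofList translated
  have hs0 := sorted_bucket (PySem.Dict.ofList translated) (PySem.Dict.ofList computed) 0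
    ["backgroundColor", "color", "borderColor"] hnd (by decide)
    (sup_color (PySem.Dict.ofList computed)) (pw_color _ _)
  have hs1 := sorted_bucket (PySem.Dict.ofList translated) (PySem.Dict.ofList computed) 1
    ["fontSize", "fontWeight", "lineHeight", "letterSpacing"] hnd (by decide)
    (sup_typo (PySem.Dict.ofList computed)) (pw_typo _ _)
  have hs2 := sorted_bucket (PySem.Dict.ofList translated) (PySem.Dict.ofList computed) 2
    ["padding", "paddingTop", "paddingRight", "paddingBottom", "paddingLeft",
     "margin", "marginTop", "gap"] hnd (by decide)
    (sup_spacing (PySem.Dict.ofList computed)) (pw_spacing _ _)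
  have hs3 := sorted_bucket (PySem.Dict.ofList translated) (PySem.Dict.ofList computed) 3
    ["borderRadius"] hnd (by decide)
    (sup_border (PySem.Dict.ofList computed)) (pw_border _ _)
  have hs4 := sorted_bucket (PySem.Dict.ofList translated) (PySem.Dict.ofList computed) 4
    ["boxShadow"] hnd (by decide)
    (sup_shadow (PySem.Dict.ofList computed)) (pw_shadow _ _)
  simp only [hs0, hs1, hs2, hs3, hs4, List.map_take]
  have hsnd0 := snd_pvYs (PySem.Dict.ofList translated) (PySem.Dict.ofList computed) 0
    ["backgroundColor", "color", "borderColor"]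
    (fun p v => "`" ++ v ++ "` (" ++ (PySem.Dict.ofList computed).getD p "" ++ ")")
    (by intro p hp v; fin_cases hp <;> rfl)
  have hsnd1 := snd_pvYs (PySem.Dict.ofList translated) (PySem.Dict.ofList computed) 1
    ["fontSize", "fontWeight", "lineHeight", "letterSpacing"]
    (fun p v => "`" ++ v ++ "`")
    (by intro p hp v; fin_cases hp <;> rfl)
  have hsnd2 := snd_pvYs (PySem.Dict.ofList translated) (PySem.Dict.ofList computed) 2
    ["padding", "paddingTop", "paddingRight", "paddingBottom", "paddingLeft",
     "margin", "marginTop", "gap"]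
    (fun p v => "`" ++ v ++ "` (" ++ (PySem.Dict.ofList computed).getD p "" ++ ")")
    (by intro p hp v; fin_cases hp <;> rfl)
  simp only [← hsnd0, ← hsnd1, ← hsnd2]
  simp only [ne_eq, List.map_eq_nil_iff]
  cases hbr : (PySem.Dict.ofList translated).get? "borderRadius" with
  | none =>
    rw [pvYs_border_none _ _ hbr]
    cases hbs : (PySem.Dict.ofList translated).get? "boxShadow" with
    | none =>
      rw [pvYs_shadow_none _ _ hbs]
      simp [PySem.Dict.contains_eq_isSome_get?, hbr, hbs]
    | some w =>
      rw [pvYs_shadow_some _ _ w hbs]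
      simp [PySem.Dict.contains_eq_isSome_get?, hbr, hbs,
        PySem.Dict.getD_of_get?_eq_some (PySem.Dict.ofList translated) "" hbs,
        join_singleton, String.append_assoc, shadow_lit]
  | some v =>
    rw [pvYs_border_some _ _ v hbr]
    cases hbs : (PySem.Dict.ofList translated).get? "boxShadow" with
    | none =>
      rw [pvYs_shadow_none _ _ hbs]
      simp [PySem.Dict.contains_eq_isSome_get?, hbr, hbs,
        PySem.Dict.getD_of_get?_eq_some (PySem.Dict.ofList translated) "" hbr,
        join_singleton, String.append_assoc, border_lit]
    | some w =>
      rw [pvYs_shadow_some _ _ w hbs]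
      simp [PySem.Dict.contains_eq_isSome_get?, hbr, hbs,
        PySem.Dict.getD_of_get?_eq_some (PySem.Dict.ofList translated) "" hbr,
        PySem.Dict.getD_of_get?_eq_some (PySem.Dict.ofList translated) "" hbs,
        join_singleton, String.append_assoc, border_lit, shadow_lit]
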